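-- pv_equiv track=rewrite | github.com/IvanaXu/leetcode | 2395.find-subarrays-with-equal-sum.py | findSubarrays
-- ===== SOURCE A (Python) =====
-- from typing import List
--
-- def findSubarrays(nums: List[int]) -> bool:
--     _r, _l = [], len(nums)
--     for n in range(_l-1):
--         v1, v2 = nums[n], nums[n+1]
--         _s = v1 + v2
--         if _s not in _r:
--             _r.append(_s)
--         else:
--             return True
--     return False
-- ===== SOURCE B (Python) =====
-- def findSubarrays(nums):
--     sums = sorted(a + b for a, b in zip(nums, nums[1:]))
--     return any(x == y for x, y in zip(sums, sums[1:]))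
-- ===== Notes on version B (the rewrite author's own statement) =====
-- stated objective: alternative
-- what changed: Replaced A's incremental scan with an in-loop list-membership test and early return by a sort-then-scan: build the adjacent-pair sums via zip, sort them, and check whether any two consecutive sorted sums are equal.
import Mathlib
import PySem

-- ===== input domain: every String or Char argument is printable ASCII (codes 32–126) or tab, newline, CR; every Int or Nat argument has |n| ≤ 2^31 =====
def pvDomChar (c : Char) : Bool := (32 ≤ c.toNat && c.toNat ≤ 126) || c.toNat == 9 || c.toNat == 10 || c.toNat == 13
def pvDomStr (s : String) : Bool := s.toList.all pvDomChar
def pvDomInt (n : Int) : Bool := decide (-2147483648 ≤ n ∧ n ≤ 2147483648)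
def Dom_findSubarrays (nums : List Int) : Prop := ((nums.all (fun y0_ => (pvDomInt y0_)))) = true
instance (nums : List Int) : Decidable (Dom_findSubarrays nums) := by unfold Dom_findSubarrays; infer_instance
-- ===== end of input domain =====

-- B replaces A's incremental membership-scan with early return by a sort-then-scan:
-- it sorts the adjacent-pair sums and checks whether any two consecutive sorted sums are equal (alternative algorithm).


-- ===== PORT A =====
-- the for-loop over range(_l-1) with accumulator _r and early 'return True'
def findSubarraysGo (nums : List Int) : List Int → List Int → Bool
  | [], _ => false
  | n :: rest, r =>
    let v1 := PySem.List.pyGetD nums n 0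
    let v2 := PySem.List.pyGetD nums (n + 1) 0
    let s := v1 + v2
    if s ∉ r then findSubarraysGo nums rest (r ++ [s]) else true

def findSubarrays (nums : List Int) : Bool :=
  findSubarraysGo nums (PySem.List.pyRange 0 ((nums.length : Int) - 1) 1) []

-- ===== PORT B =====
-- any(x == y for x, y in zip(sums, sums[1:]))
def findSubarrays_alt (nums : List Int) : Bool :=
  let sums := PySem.List.sorted
    ((nums.zip (PySem.List.slice nums (some 1) none)).map (fun p => p.1 + p.2))
    (fun x => x) false
  (sums.zip (PySem.List.slice sums (some 1) none)).any (fun p => p.1 == p.2)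

-- ===== PRECONDITION & SPEC =====
def Spec_findSubarrays (nums : List Int) (out : Bool) : Prop := out = findSubarrays_alt nums
instance (nums : List Int) (out : Bool) : Decidable (Spec_findSubarrays nums out) := by unfold Spec_findSubarrays; infer_instance

-- ===== CLAIM =====
def Claim_equal_findSubarrays : Prop := ∀ (nums : List Int), Dom_findSubarrays nums → Spec_findSubarrays nums (findSubarrays nums)

-- ===== LEMMAS AND PROOFS =====

-- A's loop over the index list equals the abstract scan over the list of sums
def dupScan : List Int → List Int → Bool
  | [], _ => false
  | s :: rest, r => if s ∉ r then dupScan rest (r ++ [s]) else true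

theorem go_eq_dupScan (nums : List Int) (idxs r : List Int) :
    findSubarraysGo nums idxs r =
      dupScan (idxs.map (fun i => PySem.List.pyGetD nums i 0 + PySem.List.pyGetD nums (i + 1) 0)) r := by
  induction idxs generalizing r with
  | nil => rfl
  | cons n rest ih =>
    simp only [findSubarraysGo, dupScan, List.map]
    split_ifs <;> simp [ih]

theorem dupScan_eq (S : List Int) : ∀ r : List Int, r.Nodup →
    dupScan S r = decide (¬ (r ++ S).Nodup) := by
  induction S with
  | nil => intro r hr; simp [dupScan, hr]
  | cons s rest ih =>
    intro r hr
    simp only [dupScan]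
    by_cases hs : s ∈ r
    · rw [if_neg (by simp [hs])]
      have : ¬ (r ++ s :: rest).Nodup := fun h =>
        (List.nodup_append.mp h).2.2 s hs s List.mem_cons_self rfl
      simp [this]
    · rw [if_pos (by simp [hs])]
      have hr' : (r ++ [s]).Nodup := by
        rw [List.nodup_append]
        refine ⟨hr, List.nodup_singleton s, ?_⟩
        intro a ha b hb
        simp only [List.mem_singleton] at hb
        subst hb
        exact fun e => hs (e ▸ ha)
      rw [ih (r ++ [s]) hr']
      congr 1
      rw [List.append_assoc]
      rfl

-- the two ways of forming the adjacent-pair sums agree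
theorem sums_index_eq_zip (nums : List Int) :
    (PySem.List.pyRange 0 ((nums.length : Int) - 1) 1).map
      (fun i => PySem.List.pyGetD nums i 0 + PySem.List.pyGetD nums (i + 1) 0) =
    (nums.zip nums.tail).map (fun p => p.1 + p.2) := by
  apply List.ext_getElem
  · simp [PySem.List.length_pyRange_one]
  · intro i h1 h2
    simp only [List.getElem_map, PySem.List.getElem_pyRange_one, List.getElem_zip]
    rw [List.length_map, PySem.List.length_pyRange_one] at h1
    have hi1 : i < nums.length - 1 := by omega
    rw [show (0 : Int) + (i : Nat) = ((i : Nat) : Int) by ring,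
        show ((i : Nat) : Int) + 1 = (((i + 1 : Nat)) : Int) by push_cast; ring,
        PySem.List.pyGetD_natCast, PySem.List.pyGetD_natCast,
        List.getD_eq_getElem _ _ (by omega), List.getD_eq_getElem _ _ (by omega)]
    simp [List.getElem_tail]

-- on a ≤-sorted list, an adjacent equal pair exists iff the list has a duplicate
theorem adj_eq_iff_not_nodup (L : List Int) (hL : L.Pairwise (· ≤ ·)) :
    (L.zip L.tail).any (fun p => p.1 == p.2) = decide (¬ L.Nodup) := by
  induction L with
  | nil => simp
  | cons a t ih =>
    cases t with
    | nil => simp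
    | cons b t' =>
      have hab : a ≤ b := (List.pairwise_cons.mp hL).1 b List.mem_cons_self
      have ht : (b :: t').Pairwise (· ≤ ·) := (List.pairwise_cons.mp hL).2
      simp only [List.tail_cons, List.zip_cons_cons, List.any_cons]
      by_cases hEq : a = b
      · subst hEq
        simp [List.nodup_cons]
      · have hnm : a ∉ b :: t' := by
          intro hm
        
          rcases List.mem_cons.mp hm with h | h
          · exact hEq h
          · have hba : b ≤ a := (List.pairwise_cons.mp ht).1 a h
            exact hEq (le_antisymm hab hba)
        have h' := ih ht
        simp only [List.tail_cons] at h'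
        rw [h']
        have ha : a ∉ t' := fun h => hnm (List.mem_cons_of_mem _ h)
        simp [hEq, ha, List.nodup_cons]

theorem findSubarrays_spec : Claim_equal_findSubarrays := by
  intro nums _
  unfold Spec_findSubarrays findSubarrays findSubarrays_alt
  rw [go_eq_dupScan, dupScan_eq _ [] List.nodup_nil, List.nil_append, sums_index_eq_zip]
  simp only [PySem.List.slice_from_one]
  set S := (nums.zip nums.tail).map (fun p => p.1 + p.2) with hS
  have hperm : (PySem.List.sorted S (fun x => x) false).Perm S := PySem.List.sorted_perm _ _ _
  rw [adj_eq_iff_not_nodup _ (by simpa using PySem.List.sorted_pairwise (xs := S) (key := fun x => x))]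
  simp [hperm.nodup_iff]
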